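-- pv_equiv track=rewrite | github.com/derronp/thesis_test | tools/af_summarize.py | _attach_reasons
-- ===== SOURCE A (Python) =====
-- def _attach_reasons(att_rows, reason_edges):
--     reason_map = {(e["from"], e["to"]): e.get("reason", "") for e in reason_edges}
--     merged = []
--     for r in att_rows:
--         merged.append({
--             "attacker": r.get("attacker", ""),
--             "target": r.get("target", ""),
--             "reason": reason_map.get((r.get("attacker", ""), r.get("target", "")), "")
--         })
--     return merged
-- ===== SOURCE B (Python) =====
-- def _attach_reasons(att_rows, reason_edges):
--     # Nested-join rewrite: no prebuilt index; scan reason_edges per row, last match wins.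
--     merged = []
--     for r in att_rows:
--         a = r.get("attacker", "")
--         t = r.get("target", "")
--         reason = ""
--         for e in reason_edges:
--             if (e["from"], e["to"]) == (a, t):
--                 reason = e.get("reason", "")
--         merged.append({"attacker": a, "target": t, "reason": reason})
--     return merged
-- ===== Notes on version B (the rewrite author's own statement) =====
-- stated objective: alternative
-- what changed: Replaced the prebuilt (from,to)->reason dict with a direct nested scan of reason_edges per row keeping the last matching edge's reason.
import Mathlib
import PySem

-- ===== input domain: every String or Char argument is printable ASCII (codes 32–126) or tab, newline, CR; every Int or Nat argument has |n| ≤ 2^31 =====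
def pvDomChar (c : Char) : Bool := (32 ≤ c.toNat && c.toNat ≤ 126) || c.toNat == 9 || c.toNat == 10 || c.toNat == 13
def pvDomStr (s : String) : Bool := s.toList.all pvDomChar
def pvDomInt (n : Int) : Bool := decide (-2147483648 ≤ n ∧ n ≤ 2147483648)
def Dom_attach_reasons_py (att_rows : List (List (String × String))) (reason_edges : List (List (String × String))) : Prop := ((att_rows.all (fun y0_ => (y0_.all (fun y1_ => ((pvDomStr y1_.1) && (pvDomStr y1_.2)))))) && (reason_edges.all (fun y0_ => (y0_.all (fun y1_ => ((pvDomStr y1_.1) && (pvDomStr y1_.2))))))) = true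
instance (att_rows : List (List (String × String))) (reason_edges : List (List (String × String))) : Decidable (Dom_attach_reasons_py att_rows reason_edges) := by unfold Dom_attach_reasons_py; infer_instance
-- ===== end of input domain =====

-- B replaces A's prebuilt (from,to)->reason dict with a per-row last-match scan of reason_edges (alternative decomposition, same output).


-- dict lookup d.get(k, dflt) on a row/edge given as an association list
def pvGetD (d : List (String × String)) (k : String) (dflt : String) : String :=
  (PySem.Dict.mk d).getD k dflt

-- ===== PORT A =====
-- reason_map = {(e["from"], e["to"]): e.get("reason","") for e in reason_edges}; Pre_ guarantees
-- the "from"/"to" keys are present, so e["from"] is ported as getD "" (exact under Pre_).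
def attach_reasons_py (att_rows : List (List (String × String))) (reason_edges : List (List (String × String))) : List (List (String × String)) :=
  let reason_map : PySem.Dict (String × String) String :=
    reason_edges.foldl (fun d e => d.insert (pvGetD e "from" "", pvGetD e "to" "") (pvGetD e "reason" "")) PySem.Dict.empty
  att_rows.foldl (fun merged r =>
    merged ++ [[("attacker", pvGetD r "attacker" ""),
                ("target", pvGetD r "target" ""),
                ("reason", reason_map.getD (pvGetD r "attacker" "", pvGetD r "target" "") "")]]) []

-- ===== PORT B =====
def attach_reasons_py_alt (att_rows : List (List (String × String))) (reason_edges : List (List (String × String))) : List (List (String × String)) :=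
  att_rows.foldl (fun merged r =>
    let a := pvGetD r "attacker" ""
    let t := pvGetD r "target" ""
    let reason := reason_edges.foldl (fun acc e =>
      if pvGetD e "from" "" = a ∧ pvGetD e "to" "" = t then pvGetD e "reason" "" else acc) ""
    merged ++ [[("attacker", a), ("target", t), ("reason", reason)]]) []

-- ===== PRECONDITION & SPEC =====
-- Pre_ excludes exactly the inputs where A raises KeyError: a reason edge missing "from" or "to".
def Pre_attach_reasons_py (att_rows : List (List (String × String))) (reason_edges : List (List (String × String))) : Prop :=
  ∀ e ∈ reason_edges, ((PySem.Dict.mk e).get? "from").isSome ∧ ((PySem.Dict.mk e).get? "to").isSome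
instance (att_rows : List (List (String × String))) (reason_edges : List (List (String × String))) : Decidable (Pre_attach_reasons_py att_rows reason_edges) := by unfold Pre_attach_reasons_py; infer_instance
def pvWitness_attach_reasons_py : (List (List (String × String))) × (List (List (String × String))) :=
  ([[("attacker", "a"), ("target", "b")]], [[("from", "a"), ("to", "b"), ("reason", "r")]])

def Spec_attach_reasons_py (att_rows : List (List (String × String))) (reason_edges : List (List (String × String))) (out : List (List (String × String))) : Prop := out = attach_reasons_py_alt att_rows reason_edges
instance (att_rows : List (List (String × String))) (reason_edges : List (List (String × String))) (out : List (List (String × String))) : Decidable (Spec_attach_reasons_py att_rows reason_edges out) := by unfold Spec_attach_reasons_py; infer_instance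

-- ===== CLAIM (what is proved, stated in full; the proofs are below) =====
def Claim_equal_attach_reasons_py : Prop := ∀ (att_rows : List (List (String × String))) (reason_edges : List (List (String × String))), Dom_attach_reasons_py att_rows reason_edges → Pre_attach_reasons_py att_rows reason_edges → Spec_attach_reasons_py att_rows reason_edges (attach_reasons_py att_rows reason_edges)

-- ===== LEMMAS AND PROOFS =====

-- Looking up a key in the dict built by A's comprehension equals B's last-match scan.
lemma getD_foldl_insert_key_eq_scan (edges : List (List (String × String)))
    (d : PySem.Dict (String × String) String) (a t : String) :
    (edges.foldl (fun d e => d.insert (pvGetD e "from" "", pvGetD e "to" "") (pvGetD e "reason" "")) d).getD (a, t) ""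
      = edges.foldl (fun acc e =>
          if pvGetD e "from" "" = a ∧ pvGetD e "to" "" = t then pvGetD e "reason" "" else acc) (d.getD (a, t) "") := by
  induction edges generalizing d with
  | nil => rfl
  | cons e es ih =>
    simp only [List.foldl_cons, ih, PySem.Dict.getD_insert]
    congr 1
    by_cases h : pvGetD e "from" "" = a ∧ pvGetD e "to" "" = t
    · rw [if_pos h, if_pos (by rw [h.1, h.2])]
    · rw [if_neg h, if_neg (by rintro ⟨rfl, rfl⟩; exact h ⟨rfl, rfl⟩)]

-- ===== VERDICT (by name: the statement is the Claim_ definition above) =====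
-- an append-one-row loop is the map of its row function
lemma foldl_append_singleton {α β : Type} (f : α → β) (l : List α) (init : List β) :
    l.foldl (fun m r => m ++ [f r]) init = init ++ l.map f := by
  induction l generalizing init with
  | nil => simp
  | cons x xs ih => simp [List.foldl_cons, ih]

theorem attach_reasons_py_spec : Claim_equal_attach_reasons_py := by
  intro att_rows reason_edges _ _
  unfold Spec_attach_reasons_py attach_reasons_py attach_reasons_py_alt
  rw [foldl_append_singleton, foldl_append_singleton]
  simp only [List.nil_append]
  exact List.map_congr_left (fun r _ => by
    simp only [getD_foldl_insert_key_eq_scan, PySem.Dict.getD_empty])
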